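-- pv_equiv track=rewrite | github.com/iamcoderisk/sendbaba | app/services/reply/reply_ai_advanced.py | detect_buying_signals
-- ===== SOURCE A (Python) =====
-- def detect_buying_signals(text):
--     """Detect if customer is ready to buy"""
--     strong_signals = [
--         'ready to buy', 'want to purchase', 'sign up now',
--         'get started', 'credit card', 'payment', 'invoice'
--     ]
--
--     medium_signals = [
--         'interested', 'tell me more', 'learn more',
--         'demo', 'trial', 'pricing'
--     ]
--
--     weak_signals = [
--         'curious', 'looking at', 'considering',
--         'might be', 'thinking about'
--     ]
--
--     text_lower = text.lower()
--
--     if any(signal in text_lower for signal in strong_signals):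
--         return 'hot'  # Ready to buy
--     elif any(signal in text_lower for signal in medium_signals):
--         return 'warm'  # Interested
--     elif any(signal in text_lower for signal in weak_signals):
--         return 'cold'  # Just browsing
--
--     return 'unknown'
-- ===== SOURCE B (Python) =====
-- def detect_buying_signals(text):
--     """Detect if customer is ready to buy"""
--     rank_of = {
--         'ready to buy': 3, 'want to purchase': 3, 'sign up now': 3,
--         'get started': 3, 'credit card': 3, 'payment': 3, 'invoice': 3,
--         'interested': 2, 'tell me more': 2, 'learn more': 2,
--         'demo': 2, 'trial': 2, 'pricing': 2,
--         'curious': 1, 'looking at': 1, 'considering': 1,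
--         'might be': 1, 'thinking about': 1,
--     }
--
--     text_lower = text.lower()
--
--     best = 0
--     for sig, rank in rank_of.items():
--         if sig in text_lower and rank > best:
--             best = rank
--
--     if best == 3:
--         return 'hot'
--     if best == 2:
--         return 'warm'
--     if best == 1:
--         return 'cold'
--     return 'unknown'
-- ===== Notes on version B (the rewrite author's own statement) =====
-- stated objective: alternative
-- what changed: Replaces the three-tier early-return any() chain with a single dict mapping each signal to a strength rank, one accumulation loop keeping the best rank found, and a final rank-to-label mapping.
import Mathlib
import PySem

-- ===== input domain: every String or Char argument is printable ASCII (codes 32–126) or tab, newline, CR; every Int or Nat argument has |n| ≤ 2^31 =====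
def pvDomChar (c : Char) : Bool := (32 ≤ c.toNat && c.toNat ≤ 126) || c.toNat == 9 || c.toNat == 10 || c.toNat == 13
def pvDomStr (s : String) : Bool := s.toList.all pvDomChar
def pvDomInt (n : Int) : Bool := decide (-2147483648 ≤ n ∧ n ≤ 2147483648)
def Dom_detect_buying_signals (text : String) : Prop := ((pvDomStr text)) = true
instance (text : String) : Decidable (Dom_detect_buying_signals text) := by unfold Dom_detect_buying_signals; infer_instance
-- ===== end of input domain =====

-- B replaces A's three-tier early-return any() chain by one signal→rank dict, a single
-- best-rank accumulation loop and a rank→label mapping (objective: alternative, same cost).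

-- ===== PORT A =====
def strong_signals : List String :=
  ["ready to buy", "want to purchase", "sign up now",
   "get started", "credit card", "payment", "invoice"]

def medium_signals : List String :=
  ["interested", "tell me more", "learn more",
   "demo", "trial", "pricing"]

def weak_signals : List String :=
  ["curious", "looking at", "considering",
   "might be", "thinking about"]

def detect_buying_signals (text : String) : String :=
  let text_lower := PySem.Str.lower text
  if strong_signals.any (fun signal => PySem.Str.isIn signal text_lower) then
    "hot"
  else if medium_signals.any (fun signal => PySem.Str.isIn signal text_lower) then
    "warm"
  else if weak_signals.any (fun signal => PySem.Str.isIn signal text_lower) then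
    "cold"
  else
    "unknown"

-- ===== PORT B =====
def signal_rank : List (String × Nat) :=
  [("ready to buy", 3), ("want to purchase", 3), ("sign up now", 3),
   ("get started", 3), ("credit card", 3), ("payment", 3), ("invoice", 3),
   ("interested", 2), ("tell me more", 2), ("learn more", 2),
   ("demo", 2), ("trial", 2), ("pricing", 2),
   ("curious", 1), ("looking at", 1), ("considering", 1),
   ("might be", 1), ("thinking about", 1)]

set_option maxHeartbeats 1000000 in
def detect_buying_signals_alt (text : String) : String :=
  let text_lower := PySem.Str.lower text
  let best := signal_rank.foldl
    (fun (best : Nat) (p : String × Nat) => if PySem.Str.isIn p.1 text_lower = true ∧ best < p.2 then p.2 else best) 0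
  if best = 3 then "hot"
  else if best = 2 then "warm"
  else if best = 1 then "cold"
  else "unknown"

-- ===== PRECONDITION & SPEC =====
def Spec_detect_buying_signals (text : String) (out : String) : Prop := out = detect_buying_signals_alt text
instance (text : String) (out : String) : Decidable (Spec_detect_buying_signals text out) := by unfold Spec_detect_buying_signals; infer_instance

-- ===== CLAIM (what is proved, stated in full; the proofs are below) =====
def Claim_equal_detect_buying_signals : Prop := ∀ (text : String), Dom_detect_buying_signals text → Spec_detect_buying_signals text (detect_buying_signals text)

-- ===== LEMMAS AND PROOFS =====

-- one tier of B's loop: over signals all of rank r, the fold is a conditional update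
theorem tier_fold (m : String → Bool) (sigs : List String) (r b : Nat) :
    List.foldl (fun (best : Nat) (p : String × Nat) => if m p.1 = true ∧ best < p.2 then p.2 else best) b
      (sigs.map (fun s => (s, r)))
    = if sigs.any m = true ∧ b < r then r else b := by
  induction sigs generalizing b with
  | nil => simp
  | cons s ss ih =>
    simp only [List.map_cons, List.foldl_cons, List.any_cons]
    by_cases h : m s = true <;> by_cases hss : ss.any m = true <;>
      simp only [h, hss, Bool.or_false, Bool.or_true, true_and] <;>
      rw [ih] <;>
      simp only [hss, true_and] <;>
      split_ifs <;> omega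

theorem signal_rank_split :
    signal_rank = strong_signals.map (fun s => (s, 3))
      ++ medium_signals.map (fun s => (s, 2))
      ++ weak_signals.map (fun s => (s, 1)) := by rfl

theorem detect_eq (text : String) :
    detect_buying_signals text = detect_buying_signals_alt text := by
  simp only [detect_buying_signals, detect_buying_signals_alt, signal_rank_split,
    List.foldl_append]
  rw [tier_fold (fun s => PySem.Str.isIn s (PySem.Str.lower text)),
    tier_fold (fun s => PySem.Str.isIn s (PySem.Str.lower text)),
    tier_fold (fun s => PySem.Str.isIn s (PySem.Str.lower text))]
  by_cases hs : (strong_signals.any fun s => PySem.Str.isIn s (PySem.Str.lower text)) = true <;>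
    by_cases hmed : (medium_signals.any fun s => PySem.Str.isIn s (PySem.Str.lower text)) = true <;>
      by_cases hw : (weak_signals.any fun s => PySem.Str.isIn s (PySem.Str.lower text)) = true <;>
        simp only [hs, hmed, hw, true_and] <;> norm_num

-- ===== VERDICT (by name: the statement is the Claim_ definition above) =====
theorem detect_buying_signals_spec : Claim_equal_detect_buying_signals := by
  intro text _
  unfold Spec_detect_buying_signals
  exact detect_eq text
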